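-- pv_equiv track=rewrite | github.com/SultanUOL/CO3095-Virtual-Chat-Assistant | src/vca/core/intents.py | _phrase_words_match
-- ===== SOURCE A (Python) =====
-- from typing import List, Tuple
--
-- def _phrase_words_match(word_list: List[str], phrase_words: List[str]) -> bool:
--     if not phrase_words:
--         return False
--     if len(phrase_words) == 1:
--         return phrase_words[0] in word_list
--     if len(word_list) < len(phrase_words):
--         return False
--
--     last = len(word_list) - len(phrase_words)
--     for i in range(0, last + 1):
--         if word_list[i : i + len(phrase_words)] == phrase_words:
--             return True
--     return False
-- ===== SOURCE B (Python) =====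
-- from typing import List, Tuple
--
-- def _phrase_words_match(word_list: List[str], phrase_words: List[str]) -> bool:
--     # Rabin-Karp: rolling polynomial hash (mod a Mersenne prime) over per-word
--     # hashes; a window is compared only on a hash hit, so collisions are harmless.
--     m = len(phrase_words)
--     n = len(word_list)
--     if m == 0 or n < m:
--         return False
--
--     B = 1000003
--     M = (1 << 61) - 1
--
--     def word_hash(w):
--         s = 0
--         for c in w:
--             s = (s * 257 + ord(c)) % M
--         return s
--
--     def seq_hash(xs):
--         acc = 0
--         for x in xs:
--             acc = (acc * B + x) % M
--         return acc
--
--     hs = [word_hash(w) for w in word_list]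
--     target = seq_hash([word_hash(w) for w in phrase_words])
--     cur = seq_hash(hs[:m])
--     power = pow(B, m - 1, M)
--     last = n - m
--     i = 0
--     while True:
--         if cur == target and word_list[i:i + m] == phrase_words:
--             return True
--         if i == last:
--             return False
--         cur = ((cur - hs[i] * power) % M * B + hs[i + m]) % M
--         i = i + 1
-- ===== Notes on version B (the rewrite author's own statement) =====
-- stated objective: alternative
-- what changed: B replaces A's slice comparison at every start position with a Rabin-Karp rolling polynomial hash (mod 2^61-1) over precomputed per-word hashes, comparing the actual window only on a hash hit.
import Mathlib
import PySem

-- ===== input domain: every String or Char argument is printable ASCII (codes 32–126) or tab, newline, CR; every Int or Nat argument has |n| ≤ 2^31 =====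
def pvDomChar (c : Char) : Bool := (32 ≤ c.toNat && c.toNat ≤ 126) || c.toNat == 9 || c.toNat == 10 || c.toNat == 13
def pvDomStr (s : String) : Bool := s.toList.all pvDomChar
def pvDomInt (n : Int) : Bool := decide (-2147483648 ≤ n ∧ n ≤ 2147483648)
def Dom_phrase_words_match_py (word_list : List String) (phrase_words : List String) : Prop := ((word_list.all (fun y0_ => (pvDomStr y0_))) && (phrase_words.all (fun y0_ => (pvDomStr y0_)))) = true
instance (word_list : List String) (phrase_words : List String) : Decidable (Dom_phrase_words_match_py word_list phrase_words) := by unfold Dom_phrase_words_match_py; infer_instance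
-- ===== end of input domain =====

-- B replaces A's slice comparison at every start position with a Rabin-Karp rolling
-- polynomial hash; a window is only compared on a hash hit, so the result is exact.

-- ===== PORT A =====
def phrase_words_match_py (word_list : List String) (phrase_words : List String) : Bool :=
  if phrase_words.isEmpty then false
  else if phrase_words.length == 1 then
    -- phrase_words[0]: the branch guarantees phrase_words is nonempty, so headD is exact
    word_list.contains (phrase_words.headD "")
  else if word_list.length < phrase_words.length then false
  else
    let last := word_list.length - phrase_words.length
    -- for i in range(0, last+1): early return True == any
    (List.range (last + 1)).any (fun i =>
      PySem.List.slice word_list (some (i : Int)) (some ((i : Int) + (phrase_words.length : Int))) == phrase_words)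

-- ===== PORT B =====
-- the modulus M = 2^61 - 1; Python's '%' equals Int.emod ('%') for a positive divisor, exact
def rkM : Int := 2305843009213693951

-- word_hash: s = (s * 257 + ord(c)) % M over the characters (ord(c) = codepoint, exact)
def wordHash (w : String) : Int :=
  w.toList.foldl (fun s c => (s * 257 + (c.toNat : Int)) % rkM) 0

-- seq_hash: acc = (acc * B + x) % M over the list
def seqHash (xs : List Int) : Int :=
  xs.foldl (fun acc x => (acc * 1000003 + x) % rkM) 0

-- the 'while True' loop of B; fuel only makes the recursion total (the loop
-- exits at i == last before fuel runs out, so the fuel branch is unreachable)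
def rkLoop (wl ps : List String) (hs : List Int) (target power : Int)
    (last : Nat) (cur : Int) (i : Nat) (fuel : Nat) : Bool :=
  match fuel with
  | 0 => false
  | fuel + 1 =>
    if cur == target &&
        PySem.List.slice wl (some (i : Int)) (some ((i : Int) + (ps.length : Int))) == ps then
      true
    else if i == last then false
    else
      rkLoop wl ps hs target power last
        (((cur - hs.getD i 0 * power) % rkM * 1000003 + hs.getD (i + ps.length) 0) % rkM) (i + 1) fuel

def phrase_words_match_py_alt (word_list : List String) (phrase_words : List String) : Bool :=
  let m := phrase_words.length
  let n := word_list.length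
  if m == 0 || n < m then false
  else
    let hs := word_list.map wordHash
    let target := seqHash (phrase_words.map wordHash)
    let cur := seqHash (hs.take m)   -- hs[:m]: exact, m ≥ 0
    let power := (1000003 : Int) ^ (m - 1) % rkM   -- pow(B, m-1, M), exact for a Nat exponent
    let last := n - m
    rkLoop word_list phrase_words hs target power last cur 0 (last + 1)

-- ===== PRECONDITION & SPEC =====
def Spec_phrase_words_match_py (word_list : List String) (phrase_words : List String) (out : Bool) : Prop := out = phrase_words_match_py_alt word_list phrase_words
instance (word_list : List String) (phrase_words : List String) (out : Bool) : Decidable (Spec_phrase_words_match_py word_list phrase_words out) := by unfold Spec_phrase_words_match_py; infer_instance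

-- ===== CLAIM (what is proved, stated in full; the proofs are below) =====
def Claim_equal_phrase_words_match_py : Prop := ∀ (word_list : List String) (phrase_words : List String), Dom_phrase_words_match_py word_list phrase_words → Spec_phrase_words_match_py word_list phrase_words (phrase_words_match_py word_list phrase_words)

-- ===== LEMMAS AND PROOFS =====

-- common characterization: the phrase occurs as a contiguous block at position i
def OccursAt (wl ps : List String) (i : Nat) : Prop :=
  i + ps.length ≤ wl.length ∧ (wl.drop i).take ps.length = ps

theorem window_eq_iff (wl ps : List String) (i : Nat) (h : i + ps.length ≤ wl.length) :
    (wl.drop i).take ps.length = ps ↔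
      ∀ j, j < ps.length → wl.getD (i + j) "" = ps.getD j "" := by
  constructor
  · intro heq j hj
    have hjn : i + j < wl.length := by omega
    have h1 : ((wl.drop i).take ps.length)[j]'(by simp; omega) = ps[j]'hj := by
      simp [heq]
    rw [List.getD_eq_getElem wl "" hjn, List.getD_eq_getElem ps "" hj]
    rw [← h1]
    simp [List.getElem_take, List.getElem_drop]
  · intro hall
    apply List.ext_getElem
    · simp; omega
    · intro j hj1 hj2
      have hjn : i + j < wl.length := by omega
      have := hall j hj2
      rw [List.getD_eq_getElem wl "" hjn, List.getD_eq_getElem ps "" hj2] at this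
      simpa [List.getElem_take, List.getElem_drop] using this

theorem A_iff (wl ps : List String) (hps : ps ≠ []) :
    phrase_words_match_py wl ps = true ↔ ∃ i, OccursAt wl ps i := by
  unfold phrase_words_match_py
  rw [if_neg (by simpa [List.isEmpty_iff] using hps)]
  split_ifs with h1 h2
  · have hm : ps.length = 1 := by simpa using h1
    obtain ⟨p, rfl⟩ := List.length_eq_one_iff.mp hm
    simp only [List.headD_cons]
    rw [List.contains_iff_mem]
    constructor
    · intro hmem
      obtain ⟨i, hi, hget⟩ := List.mem_iff_getElem.mp hmem
      have hle : i + ([p] : List String).length ≤ wl.length := by simp; omega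
      refine ⟨i, hle, (window_eq_iff wl [p] i hle).mpr ?_⟩
      intro j hj
      have hj0 : j = 0 := by simpa using hj
      subst hj0
      simp only [Nat.add_zero, List.getD_cons_zero]
      rw [List.getD_eq_getElem wl "" (show i < wl.length by omega)]
      exact hget
    · rintro ⟨i, hle, hwin⟩
      simp only [List.length_cons, List.length_nil] at hle
      have := (window_eq_iff wl [p] i hle).mp hwin 0 (by simp)
      rw [List.getD_eq_getElem wl "" (by omega : i + 0 < wl.length)] at this
      simp at this
      exact this ▸ List.getElem_mem _
  · simp only [false_iff, not_exists]
    rintro i ⟨hle, _⟩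
    omega
  · simp only [List.any_eq_true, List.mem_range]
    constructor
    · rintro ⟨i, hi, hbeq⟩
      rw [PySem.List.slice_natCast_add, beq_iff_eq] at hbeq
      exact ⟨i, by omega, hbeq⟩
    · rintro ⟨i, hle, hwin⟩
      refine ⟨i, by omega, ?_⟩
      rw [PySem.List.slice_natCast_add, beq_iff_eq]
      exact hwin

-- pure (un-modded) polynomial value of a hash sequence; used only in the proofs
def polyHash (xs : List Int) : Int :=
  xs.foldl (fun acc x => acc * 1000003 + x) 0

theorem polyHash_foldl (xs : List Int) (a : Int) :
    xs.foldl (fun acc x => acc * 1000003 + x) a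
      = a * 1000003 ^ xs.length + polyHash xs := by
  induction xs generalizing a with
  | nil => simp [polyHash]
  | cons x xs ih =>
    simp only [List.foldl_cons, List.length_cons]
    rw [ih (a * 1000003 + x), show polyHash (x :: xs) = (x :: xs).foldl (fun acc x => acc * 1000003 + x) 0 from rfl]
    simp only [List.foldl_cons]
    rw [ih (0 * 1000003 + x)]
    ring

theorem polyHash_cons (x : Int) (xs : List Int) :
    polyHash (x :: xs) = x * 1000003 ^ xs.length + polyHash xs := by
  show (x :: xs).foldl (fun acc x => acc * 1000003 + x) 0 = _
  simp only [List.foldl_cons]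
  rw [polyHash_foldl]
  ring

theorem polyHash_append_singleton (xs : List Int) (x : Int) :
    polyHash (xs ++ [x]) = polyHash xs * 1000003 + x := by
  show (xs ++ [x]).foldl (fun acc x => acc * 1000003 + x) 0 = _
  rw [List.foldl_append]
  simp [polyHash]

-- the modded fold equals the pure fold reduced mod rkM
theorem seqHash_aux (xs : List Int) : ∀ (a b : Int), a % rkM = a → a % rkM = b % rkM →
    xs.foldl (fun acc x => (acc * 1000003 + x) % rkM) a
      = (xs.foldl (fun acc x => acc * 1000003 + x) b) % rkM := by
  induction xs with
  | nil =>
    intro a b h1 h2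
    simp only [List.foldl_nil]
    rw [← h2, h1]
  | cons x xs ih =>
    intro a b h1 h2
    simp only [List.foldl_cons]
    apply ih
    · exact Int.emod_emod_of_dvd _ dvd_rfl
    · rw [Int.emod_emod_of_dvd _ dvd_rfl]
      have h2' : Int.ModEq rkM a b := h2
      exact (h2'.mul_right 1000003).add_right x

theorem seqHash_eq (xs : List Int) : seqHash xs = polyHash xs % rkM := by
  have := seqHash_aux xs 0 0 (by simp) rfl
  simpa [seqHash, polyHash] using this

-- pure hash of the window of length m starting at i
def winHash (wl : List String) (i m : Nat) : Int :=
  polyHash (((wl.drop i).take m).map wordHash)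

-- modded hash of the same window (the loop invariant's value)
def winSeq (wl : List String) (i m : Nat) : Int :=
  seqHash (((wl.drop i).take m).map wordHash)

theorem winHash_roll (wl : List String) (i m : Nat) (hm : 1 ≤ m)
    (h : i + m < wl.length) :
    winHash wl (i + 1) m
      = (winHash wl i m - wordHash (wl[i]'(by omega)) * 1000003 ^ (m - 1)) * 1000003
        + wordHash (wl[i + m]'h) := by
  obtain ⟨k, rfl⟩ : ∃ k, m = k + 1 := ⟨m - 1, by omega⟩
  have hdrop : wl.drop i = wl[i]'(by omega) :: wl.drop (i + 1) :=
    List.drop_eq_getElem_cons (by omega)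
  have hlen : k < (wl.drop (i + 1)).length := by simp; omega
  have htake : (wl.drop (i + 1)).take (k + 1)
      = (wl.drop (i + 1)).take k ++ [(wl.drop (i + 1))[k]'hlen] := by
    rw [List.take_add_one, List.getElem?_eq_getElem hlen]
    rfl
  have hget : (wl.drop (i + 1))[k]'hlen = wl[i + (k + 1)]'h := by
    rw [List.getElem_drop]
    congr 1
    omega
  have hlen2 : ((wl.drop (i + 1)).take k).length = k := by simp; omega
  unfold winHash
  rw [hdrop, List.take_succ_cons, htake, hget]
  rw [List.map_cons, List.map_append, List.map_cons, List.map_nil]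
  rw [polyHash_cons, polyHash_append_singleton]
  have hmlen : (((wl.drop (i + 1)).take k).map wordHash).length = k := by
    simp
    omega
  rw [hmlen]
  simp only [Nat.add_sub_cancel]
  ring

theorem winSeq_roll (wl : List String) (i m : Nat) (hm : 1 ≤ m)
    (h : i + m < wl.length) :
    winSeq wl (i + 1) m
      = ((winSeq wl i m - wordHash (wl[i]'(by omega)) * (1000003 ^ (m - 1) % rkM)) % rkM
          * 1000003 + wordHash (wl[i + m]'h)) % rkM := by
  have hroll := winHash_roll wl i m hm h
  unfold winSeq
  rw [seqHash_eq, seqHash_eq]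
  show winHash wl (i + 1) m % rkM = _
  rw [hroll]
  have m1 : Int.ModEq rkM (winHash wl i m % rkM) (winHash wl i m) :=
    Int.emod_emod_of_dvd _ dvd_rfl
  have m2 : Int.ModEq rkM ((1000003 : Int) ^ (m - 1) % rkM) ((1000003 : Int) ^ (m - 1)) :=
    Int.emod_emod_of_dvd _ dvd_rfl
  have m3 := m1.sub (m2.mul_left (wordHash (wl[i]'(by omega))))
  have m4 : Int.ModEq rkM
      ((winHash wl i m % rkM - wordHash (wl[i]'(by omega)) * ((1000003 : Int) ^ (m - 1) % rkM)) % rkM)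
      (winHash wl i m - wordHash (wl[i]'(by omega)) * (1000003 : Int) ^ (m - 1)) :=
    (Int.emod_emod_of_dvd _ (dvd_rfl (a := rkM))).trans m3
  exact ((m4.mul_right 1000003).add_right (wordHash (wl[i + m]'h))).symm

theorem rkLoop_iff (wl ps : List String) (m last : Nat)
    (hm : 1 ≤ m) (hmps : ps.length = m) (hlast : last = wl.length - m)
    (hmn : m ≤ wl.length) :
    ∀ (fuel i : Nat) (cur : Int), i ≤ last → fuel = last + 1 - i →
      cur = winSeq wl i m →
      (rkLoop wl ps (wl.map wordHash) (seqHash (ps.map wordHash)) (1000003 ^ (m - 1) % rkM)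
          last cur i fuel = true
        ↔ ∃ j, i ≤ j ∧ j ≤ last ∧ (wl.drop j).take m = ps) := by
  intro fuel
  induction fuel with
  | zero => intro i cur hile hfuel hcur; omega
  | succ fuel ih =>
    intro i cur hile hfuel hcur
    rw [rkLoop]
    have hslice : (PySem.List.slice wl (some (i : Int)) (some ((i : Int) + (ps.length : Int))) == ps)
        = decide ((wl.drop i).take m = ps) := by
      rw [PySem.List.slice_natCast_add, hmps]
      by_cases h : (wl.drop i).take m = ps <;> simp [h]
    by_cases hwin : (wl.drop i).take m = ps
    · have hcond : (cur == seqHash (ps.map wordHash) &&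
          (PySem.List.slice wl (some (i : Int)) (some ((i : Int) + (ps.length : Int))) == ps)) = true := by
        rw [hslice]
        have : cur = seqHash (ps.map wordHash) := by
          rw [hcur]; unfold winSeq; rw [hwin]
        simp [this, hwin]
      rw [hcond]
      simp only [if_true, true_iff]
      exact ⟨i, le_refl i, hile, hwin⟩
    · have hcond : (cur == seqHash (ps.map wordHash) &&
          (PySem.List.slice wl (some (i : Int)) (some ((i : Int) + (ps.length : Int))) == ps)) = false := by
        rw [hslice]
        simp [hwin]
      rw [hcond]
      simp only [Bool.false_eq_true, if_false]
      by_cases hil : i = last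
      · subst hil
        simp only [beq_self_eq_true, if_true]
        constructor
        · intro h; simp at h
        · rintro ⟨j, hij, hjl, hj⟩
          have : j = i := by omega
          subst this
          exact absurd hj hwin
      · rw [if_neg (by simpa using hil)]
        have hstep : i + m < wl.length := by omega
        have hgd1 : (wl.map wordHash).getD i 0 = wordHash (wl[i]'(by omega)) := by
          rw [List.getD_eq_getElem _ 0 (by simp; omega)]
          simp
        have hgd2 : (wl.map wordHash).getD (i + m) 0 = wordHash (wl[i + m]'hstep) := by
          rw [List.getD_eq_getElem _ 0 (by simp; omega)]
          simp
        rw [hmps, hgd1, hgd2]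
        rw [ih (i + 1) _ (by omega) (by omega)
          (by rw [hcur]; exact (winSeq_roll wl i m hm hstep).symm)]
        constructor
        · rintro ⟨j, hij, hjl, hj⟩
          exact ⟨j, by omega, hjl, hj⟩
        · rintro ⟨j, hij, hjl, hj⟩
          refine ⟨j, ?_, hjl, hj⟩
          rcases Nat.eq_or_lt_of_le hij with rfl | h
          · exact absurd hj hwin
          · omega

theorem B_iff (wl ps : List String) (hps : ps ≠ []) :
    phrase_words_match_py_alt wl ps = true ↔ ∃ i, OccursAt wl ps i := by
  have hm : 1 ≤ ps.length := List.length_pos_of_ne_nil hps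
  unfold phrase_words_match_py_alt OccursAt
  by_cases hn : wl.length < ps.length
  · rw [if_pos (by simp; omega)]
    simp only [Bool.false_eq_true, false_iff, not_exists]
    rintro i ⟨hle, _⟩
    omega
  · rw [if_neg (by simp only [Bool.or_eq_true, beq_iff_eq, decide_eq_true_eq, not_or]; omega)]
    show rkLoop wl ps (wl.map wordHash) (seqHash (ps.map wordHash))
        ((1000003 : Int) ^ (ps.length - 1) % rkM) (wl.length - ps.length)
        (seqHash ((wl.map wordHash).take ps.length)) 0 ((wl.length - ps.length) + 1) = true ↔ _
    have htake0 : (wl.map wordHash).take ps.length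
        = ((wl.drop 0).take ps.length).map wordHash := by
      simp [List.map_take]
    rw [htake0]
    rw [rkLoop_iff wl ps ps.length (wl.length - ps.length) hm rfl rfl (by omega)
      (wl.length - ps.length + 1) 0 (seqHash (((wl.drop 0).take ps.length).map wordHash))
      (by omega) (by omega) rfl]
    constructor
    · rintro ⟨j, _, hjl, hj⟩
      exact ⟨j, by omega, hj⟩
    · rintro ⟨j, hle, hj⟩
      exact ⟨j, Nat.zero_le j, by omega, hj⟩

-- ===== VERDICT (by name: the statement is the Claim_ definition above) =====
theorem phrase_words_match_py_spec : Claim_equal_phrase_words_match_py := by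
  intro wl ps _
  unfold Spec_phrase_words_match_py
  rcases eq_or_ne ps [] with h | h
  · subst h; simp [phrase_words_match_py, phrase_words_match_py_alt]
  · have := (A_iff wl ps h).trans (B_iff wl ps h).symm
    exact Bool.coe_iff_coe.mp this
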